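-- pv_equiv track=rewrite | github.com/DuarteCorreia96/Mastermind | minmaxmem.py | DecodeAval
-- ===== SOURCE A (Python) =====
-- def DecodeAval(aval):
--
--     avalarr = []
--     b = 0
--     p = 0
--     while (aval % 5) != 0:
--         b += 1
--         aval -= 1
--
--     while aval != 0:
--         p += 1
--         aval -= 5
--
--     for x in range(p):
--         avalarr.append("P")
--
--     for x in range(p, b + p):
--         avalarr.append("B")
--
--     for x in range(b + p, 4):
--         avalarr.append("-")
--
--     return avalarr
-- ===== SOURCE B (Python) =====
-- def DecodeAval(aval):
--     b = aval % 5
--     p = aval // 5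
--     return ["P"] * p + ["B"] * b + ["-"] * max(0, 4 - b - p)
-- ===== Notes on version B (the rewrite author's own statement) =====
-- stated objective: faster
-- what changed: Replaces the two repeated-subtraction loops with divmod (b = aval % 5, p = aval // 5) and builds the marker list by replication instead of three range loops.
import Mathlib
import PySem

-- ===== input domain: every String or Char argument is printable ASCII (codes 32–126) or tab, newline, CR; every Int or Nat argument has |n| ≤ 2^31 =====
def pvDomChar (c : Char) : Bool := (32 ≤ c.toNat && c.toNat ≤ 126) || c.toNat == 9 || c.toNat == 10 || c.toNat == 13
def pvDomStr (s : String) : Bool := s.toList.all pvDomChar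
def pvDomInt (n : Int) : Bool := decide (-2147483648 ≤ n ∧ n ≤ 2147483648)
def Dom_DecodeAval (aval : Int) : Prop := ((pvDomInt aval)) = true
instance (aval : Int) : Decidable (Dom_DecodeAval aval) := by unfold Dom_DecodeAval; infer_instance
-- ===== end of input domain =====

-- B replaces A's two repeated-subtraction loops with divmod and list replication (objective: faster).

-- ===== PORT A =====
-- while (aval % 5) != 0: b += 1; aval -= 1   (the '0 < aval' conjunct is a totality guard only;
--  on aval < 0 the Python loop pair diverges, excluded by Pre_)
def DecodeAval_loop1 (aval b : Int) : Int × Int :=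
  if h : PySem.Int.mod aval 5 ≠ 0 ∧ 0 < aval then
    DecodeAval_loop1 (aval - 1) (b + 1)
  else
    (aval, b)
termination_by aval.toNat
decreasing_by omega

-- while aval != 0: p += 1; aval -= 5
def DecodeAval_loop2 (aval p : Int) : Int :=
  if h : aval ≠ 0 ∧ 0 < aval then
    DecodeAval_loop2 (aval - 5) (p + 1)
  else
    p
termination_by aval.toNat
decreasing_by omega

def DecodeAval (aval : Int) : List String :=
  let avalarr : List String := []
  let b : Int := 0
  let p : Int := 0
  let s1 := DecodeAval_loop1 aval b
  let aval1 := s1.1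
  let b1 := s1.2
  let p1 := DecodeAval_loop2 aval1 p
  let arr1 := (PySem.List.pyRange 0 p1 1).foldl (fun acc _ => acc ++ ["P"]) avalarr
  let arr2 := (PySem.List.pyRange p1 (b1 + p1) 1).foldl (fun acc _ => acc ++ ["B"]) arr1
  let arr3 := (PySem.List.pyRange (b1 + p1) 4 1).foldl (fun acc _ => acc ++ ["-"]) arr2
  arr3

-- ===== PORT B =====
def DecodeAval_alt (aval : Int) : List String :=
  let b := PySem.Int.mod aval 5
  let p := PySem.Int.floordiv aval 5
  List.replicate p.toNat "P" ++ List.replicate b.toNat "B" ++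
    List.replicate (max 0 (4 - b - p)).toNat "-"

-- ===== PRECONDITION & SPEC =====
-- Pre_ excludes negative aval, on which Python A loops forever in its second while loop.
def Pre_DecodeAval (aval : Int) : Prop := 0 ≤ aval
instance (aval : Int) : Decidable (Pre_DecodeAval aval) := by unfold Pre_DecodeAval; infer_instance
def pvWitness_DecodeAval : Int := (7)

def Spec_DecodeAval (aval : Int) (out : List String) : Prop := out = DecodeAval_alt aval
instance (aval : Int) (out : List String) : Decidable (Spec_DecodeAval aval out) := by unfold Spec_DecodeAval; infer_instance

-- ===== CLAIM (what is proved, stated in full; the proofs are below) =====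
def Claim_equal_DecodeAval : Prop := ∀ (aval : Int), Dom_DecodeAval aval → Pre_DecodeAval aval → Spec_DecodeAval aval (DecodeAval aval)

-- ===== LEMMAS AND PROOFS =====

theorem loop1_eq (n : Nat) : ∀ (aval b : Int), aval.toNat = n → 0 ≤ aval →
    DecodeAval_loop1 aval b = (aval - aval % 5, b + aval % 5) := by
  induction n using Nat.strong_induction_on with
  | _ n ih =>
    intro aval b hn h0
    rw [DecodeAval_loop1]
    rw [PySem.Int.mod_eq_emod_of_pos (show (0:Int) < 5 by omega)]
    split_ifs with h
    · have hlt : (aval - 1).toNat < n := by omega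
      rw [ih _ hlt _ _ rfl (by omega)]
      simp only [Prod.mk.injEq]
      constructor <;> omega
    · push Not at h
      rcases Decidable.em (aval % 5 = 0) with h5 | h5
      · simp [h5]
      · have := h h5; omega

theorem loop2_eq (n : Nat) : ∀ (aval p : Int), aval.toNat = n → 0 ≤ aval → aval % 5 = 0 →
    DecodeAval_loop2 aval p = p + aval / 5 := by
  induction n using Nat.strong_induction_on with
  | _ n ih =>
    intro aval p hn h0 hdvd
    rw [DecodeAval_loop2]
    split_ifs with h
    · have h5 : 5 ≤ aval := by omega
      have hlt : (aval - 5).toNat < n := by omega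
      rw [ih _ hlt _ _ rfl (by omega) (by omega)]
      omega
    · push Not at h
      have : aval = 0 := by omega
      simp [this]

theorem foldl_append_replicate (s : String) :
    ∀ (l : List Int) (acc : List String),
      l.foldl (fun acc _ => acc ++ [s]) acc = acc ++ List.replicate l.length s := by
  intro l
  induction l with
  | nil => simp
  | cons x xs ih =>
    intro acc
    rw [List.foldl_cons, ih, List.length_cons, List.replicate_succ]
    simp

theorem DecodeAval_spec : Claim_equal_DecodeAval := by
  intro aval _hdom hpre
  have h0 : (0:Int) ≤ aval := hpre
  have hl1 : DecodeAval_loop1 aval 0 = (aval - aval % 5, 0 + aval % 5) :=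
    loop1_eq aval.toNat aval 0 rfl h0
  have hl2 : DecodeAval_loop2 (aval - aval % 5) 0 = 0 + (aval - aval % 5) / 5 :=
    loop2_eq (aval - aval % 5).toNat _ 0 rfl (by omega) (by omega)
  have hmod : PySem.Int.mod aval 5 = aval % 5 := PySem.Int.mod_eq_emod_of_pos (by norm_num)
  have hdiv : PySem.Int.floordiv aval 5 = aval / 5 := PySem.Int.floordiv_eq_ediv_of_pos (by norm_num)
  unfold Spec_DecodeAval DecodeAval DecodeAval_alt
  simp only [hl1, hl2, hmod, hdiv, foldl_append_replicate, PySem.List.length_pyRange_one,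
    List.nil_append]
  congr 1
  · congr 1
    · congr 1
      omega
    · congr 1
      omega
  · congr 1
    omega
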